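-- pv_equiv track=rewrite | github.com/smrk007/Coding-Competitions | cowdance.py | return_wo_Tmax
-- ===== SOURCE A (Python) =====
-- def return_wo_Tmax(lis,Tmax):
--
--     remaining = Tmax
--     the_list = lis
--     for cow in the_list:
--         if (remaining>=min(the_list)):
--             the_list,remaining = wo_if_max(the_list,remaining)
--         else:
--             return(the_list)
--
-- def wo_if_max(the_list,remaining):
--
--     old_remaining = remaining
--     for x in the_list:
--         if x <= remaining:
--             new_remaining = old_remaining - x
--             indx = the_list.index(x)
--             new_list = the_list[:indx]+the_list[indx+1:]
--
--             return(new_list,new_remaining)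
-- ===== SOURCE B (Python) =====
-- def _pop_fit(kept, remaining):
--     # first element of kept that fits, together with kept without it; None if none fits
--     for i, y in enumerate(kept):
--         if y <= remaining:
--             return y, kept[:i] + kept[i + 1:]
--     return None
--
-- def return_wo_Tmax(lis, Tmax):
--     # one forward pass; 'kept' holds the elements skipped so far (all > remaining);
--     # after each removal re-drain 'kept' from the front, exactly like A's rescans
--     remaining = Tmax
--     kept = []
--     for x in lis:
--         if x <= remaining:
--             remaining -= x
--             hit = _pop_fit(kept, remaining)
--             while hit is not None:
--                 y, kept = hit
--                 remaining -= y
--                 hit = _pop_fit(kept, remaining)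
--         else:
--             kept = kept + [x]
--     return kept if kept else None
-- ===== Notes on version B (the rewrite author's own statement) =====
-- stated objective: faster
-- what changed: Replaces A's repeated full-list min()/index()/slice rescans per removal by a single forward pass that keeps skipped elements in a 'kept' list and re-drains only that list after each removal.
import Mathlib
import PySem

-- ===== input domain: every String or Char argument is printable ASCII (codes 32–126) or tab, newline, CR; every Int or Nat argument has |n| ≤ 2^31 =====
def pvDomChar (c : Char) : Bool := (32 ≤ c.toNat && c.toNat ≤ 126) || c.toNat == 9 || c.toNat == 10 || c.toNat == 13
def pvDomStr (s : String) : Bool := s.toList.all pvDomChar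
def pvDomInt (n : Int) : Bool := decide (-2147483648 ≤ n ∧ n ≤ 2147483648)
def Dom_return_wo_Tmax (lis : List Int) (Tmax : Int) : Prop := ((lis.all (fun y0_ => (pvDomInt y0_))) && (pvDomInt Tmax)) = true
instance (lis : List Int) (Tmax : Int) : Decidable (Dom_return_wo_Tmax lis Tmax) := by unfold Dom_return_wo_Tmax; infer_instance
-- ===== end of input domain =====

-- B replaces A's per-removal min()/index() full rescans by one forward pass with a re-drained 'kept' list (measured faster).


-- ===== PORT A =====
-- wo_if_max's 'for x in the_list: if x <= remaining: … return'; the_list stays whole for .index and the slices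
def woScan (the_list : List Int) (remaining : Int) : List Int → Option (List Int × Int)
  | [] => none
  | x :: xs =>
    if x ≤ remaining then
      let new_remaining := remaining - x
      match PySem.List.index? the_list x with
      | some indx =>
          some (PySem.List.slice the_list none (some (indx : Int)) ++
                PySem.List.slice the_list (some ((indx : Int) + 1)) none, new_remaining)
      | none => none  -- unreachable: x ∈ the_list
    else woScan the_list remaining xs

def wo_if_max (the_list : List Int) (remaining : Int) : Option (List Int × Int) :=
  woScan the_list remaining the_list

-- 'for cow in the_list' iterates over the ORIGINAL lis object; 'iter' counts those elements
def outerLoop : List Int → List Int → Int → Option (List Int)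
  | [], _, _ => none
  | _ :: iter, the_list, remaining =>
    match PySem.List.min? the_list (fun y => y) with
    | none => none      -- min([]) would raise; unreachable: the list empties exactly when the loop ends
    | some m =>
      if remaining ≥ m then
        match wo_if_max the_list remaining with
        | some (l, r) => outerLoop iter l r
        | none => none  -- unpacking None would raise; unreachable: the minimum itself fits
      else some the_list

def return_wo_Tmax (lis : List Int) (Tmax : Int) : Option (List Int) :=
  outerLoop lis lis Tmax

-- ===== PORT B =====
-- _pop_fit: first element of kept that fits, together with kept without it
def popFit : List Int → Int → Option (Int × List Int)
  | [], _ => none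
  | y :: ys, r => if y ≤ r then some (y, ys) else (popFit ys r).map (fun p => (p.1, y :: p.2))

theorem popFit_length {kept : List Int} {r y : Int} {ys : List Int}
    (h : popFit kept r = some (y, ys)) : ys.length + 1 = kept.length := by
  induction kept generalizing ys with
  | nil => simp [popFit] at h
  | cons z zs ih =>
    simp only [popFit] at h
    split at h
    · cases h; rfl
    · cases hz : popFit zs r with
      | none => simp [hz] at h
      | some p =>
        simp [hz] at h
        obtain ⟨h1, h2⟩ := h
        cases p with
        | mk a b =>
          subst h1
          simp at h2
          have := ih (ys := b) hz
          simp [← h2, ← this]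

-- the 'while hit is not None' loop
def drainLoop (kept : List Int) (r : Int) : List Int × Int :=
  match h : popFit kept r with
  | none => (kept, r)
  | some (y, ys) => drainLoop ys (r - y)
termination_by kept.length
decreasing_by have := popFit_length h; omega

def bstream : List Int → List Int → Int → List Int
  | [], kept, _ => kept
  | x :: rest, kept, r =>
    if x ≤ r then
      let p := drainLoop kept (r - x)
      bstream rest p.1 p.2
    else bstream rest (kept ++ [x]) r

def return_wo_Tmax_alt (lis : List Int) (Tmax : Int) : Option (List Int) :=
  let kept := bstream lis [] Tmax
  if kept = [] then none else some kept

-- ===== PRECONDITION & SPEC =====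
def Spec_return_wo_Tmax (lis : List Int) (Tmax : Int) (out : Option (List Int)) : Prop := out = return_wo_Tmax_alt lis Tmax
instance (lis : List Int) (Tmax : Int) (out : Option (List Int)) : Decidable (Spec_return_wo_Tmax lis Tmax out) := by unfold Spec_return_wo_Tmax; infer_instance

-- ===== CLAIM (what is proved, stated in full; the proofs are below) =====
def Claim_equal_return_wo_Tmax : Prop := ∀ (lis : List Int) (Tmax : Int), Dom_return_wo_Tmax lis Tmax → Spec_return_wo_Tmax lis Tmax (return_wo_Tmax lis Tmax)

-- ===== LEMMAS AND PROOFS =====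

theorem popFit_eq_none_iff {L : List Int} {r : Int} :
    popFit L r = none ↔ ∀ y ∈ L, ¬ y ≤ r := by
  induction L with
  | nil => simp [popFit]
  | cons z zs ih =>
    simp only [popFit]
    split <;> simp_all [Option.map_eq_none_iff]

theorem popFit_some_le {L : List Int} {r y : Int} {ys : List Int}
    (h : popFit L r = some (y, ys)) : y ≤ r ∧ y ∈ L := by
  induction L generalizing ys with
  | nil => simp [popFit] at h
  | cons z zs ih =>
    simp only [popFit] at h
    split at h
    · cases h; simp_all
    · cases hz : popFit zs r with
      | none => simp [hz] at h
      | some p =>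
        simp [hz] at h
        obtain ⟨h1, _⟩ := h
        cases p with
        | mk a b =>
          subst h1
          have := ih (ys := b) hz
          simp_all

theorem popFit_append_nofit {P L : List Int} {r : Int} (hP : ∀ p ∈ P, ¬ p ≤ r) :
    popFit (P ++ L) r = (popFit L r).map (fun p => (p.1, P ++ p.2)) := by
  induction P with
  | nil => simp
  | cons z zs ih =>
    have hz : ¬ z ≤ r := hP z (by simp)
    simp only [List.cons_append, popFit, if_neg hz]
    rw [ih (fun p hp => hP p (by simp [hp]))]
    cases popFit L r <;> simp

theorem popFit_append_left {P L : List Int} {r y : Int} {ys : List Int}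
    (h : popFit P r = some (y, ys)) : popFit (P ++ L) r = some (y, ys ++ L) := by
  induction P generalizing ys with
  | nil => simp [popFit] at h
  | cons z zs ih =>
    rw [List.cons_append]
    simp only [popFit] at h ⊢
    by_cases hz : z ≤ r
    · rw [if_pos hz] at h ⊢
      simp at h
      obtain ⟨rfl, rfl⟩ := h
      rfl
    · rw [if_neg hz] at h ⊢
      cases hzz : popFit zs r with
      | none => simp [hzz] at h
      | some p =>
        cases p with
        | mk a b =>
          simp [hzz] at h
          obtain ⟨h1, h2⟩ := h
          subst h1
          rw [ih hzz]
          simp [← h2]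

theorem woScan_eq {r : Int} (suffix : List Int) : ∀ (P : List Int), (∀ p ∈ P, ¬ p ≤ r) →
    woScan (P ++ suffix) r suffix = (popFit suffix r).map (fun p => (P ++ p.2, r - p.1)) := by
  induction suffix with
  | nil => intro P _; simp [woScan, popFit]
  | cons x xs ih =>
    intro P hP
    simp only [woScan, popFit]
    by_cases hx : x ≤ r
    · simp only [if_pos hx]
      have hpre : x ∉ P := fun hm => hP x hm hx
      have hidx : PySem.List.index? (P ++ x :: xs) x = some P.length :=
        (PySem.List.index?_eq_some_iff (P ++ x :: xs) x P.length).mpr ⟨P, xs, rfl, rfl, hpre⟩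
      rw [hidx]
      have h1 : PySem.List.slice (P ++ x :: xs) none (some (P.length : Int)) = P := by
        rw [PySem.List.slice_to_natCast]
        exact List.take_left ..
      have h2 : PySem.List.slice (P ++ x :: xs) (some ((P.length : Int) + 1)) none = xs := by
        have hc : ((P.length : Int) + 1) = ((P.length + 1 : Nat) : Int) := by push_cast; ring
        rw [hc, PySem.List.slice_from_natCast]
        have : P ++ x :: xs = (P ++ [x]) ++ xs := by simp
        rw [this]
        have hl : P.length + 1 = (P ++ [x]).length := by simp
        rw [hl, List.drop_left]
      simp [h1, h2]
    · simp only [if_neg hx]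
      have := ih (P ++ [x]) (by intro p hp; rcases List.mem_append.mp hp with h | h
                                · exact hP p h
                                · simp at h; subst h; exact hx)
      simp only [List.append_assoc, List.singleton_append] at this
      rw [this]
      cases popFit xs r <;> simp

theorem wo_if_max_eq (L : List Int) (r : Int) :
    wo_if_max L r = (popFit L r).map (fun p => (p.2, r - p.1)) := by
  have := woScan_eq (r := r) L [] (by simp)
  simpa [wo_if_max] using this

def Asim (L : List Int) (r : Int) : Option (List Int) :=
  match h : popFit L r with
  | none => if L = [] then none else some L
  | some (y, ys) => Asim ys (r - y)
termination_by L.length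
decreasing_by have := popFit_length h; omega

theorem Asim_none {L : List Int} {r : Int} (h : popFit L r = none) :
    Asim L r = if L = [] then none else some L := by
  rw [Asim]; split <;> simp_all

theorem Asim_some {L : List Int} {r y : Int} {ys : List Int} (h : popFit L r = some (y, ys)) :
    Asim L r = Asim ys (r - y) := by
  rw [Asim]; split <;> simp_all

theorem outerLoop_eq_Asim : ∀ (iter L : List Int) (r : Int), iter.length = L.length →
    outerLoop iter L r = Asim L r := by
  intro iter
  induction iter with
  | nil =>
    intro L r hlen
    have : L = [] := List.eq_nil_of_length_eq_zero (by simpa using hlen.symm)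
    subst this
    rw [Asim_none (by simp [popFit])]
    simp [outerLoop]
  | cons _ it ih =>
    intro L r hlen
    cases L with
    | nil => simp at hlen
    | cons z zs =>
      simp only [outerLoop]
      cases hm : PySem.List.min? (z :: zs) (fun y => y) with
      | none => exact absurd hm (by simp [PySem.List.min?_eq_none_iff])
      | some m =>
        cases hp : popFit (z :: zs) r with
        | some p =>
          cases p with
          | mk y ys =>
            obtain ⟨hyr, hymem⟩ := popFit_some_le hp
            have hmy : m ≤ y := PySem.List.min?_isMin hm y hymem
            dsimp only
            rw [if_pos (show r ≥ m from le_trans hmy hyr)]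
            rw [wo_if_max_eq, hp]
            simp only [Option.map_some]
            rw [Asim_some hp]
            exact ih ys (r - y) (by have h1 := popFit_length hp; simp only [List.length_cons] at hlen h1; omega)
        | none =>
          have hall := popFit_eq_none_iff.mp hp
          have hmmem : m ∈ z :: zs := PySem.List.min?_mem hm
          dsimp only
          rw [if_neg (show ¬ r ≥ m from hall m hmmem)]
          rw [Asim_none hp]
          simp

theorem drainLoop_nofit : ∀ (kept : List Int) (r : Int),
    ∀ y ∈ (drainLoop kept r).1, ¬ y ≤ (drainLoop kept r).2 := by
  intro kept
  induction hk : kept.length using Nat.strong_induction_on generalizing kept with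
  | _ n ih =>
    intro r
    rw [drainLoop]
    cases hp : popFit kept r with
    | none => simpa using popFit_eq_none_iff.mp hp
    | some p =>
      cases p with
      | mk y ys =>
        have hl := popFit_length hp
        exact ih ys.length (by omega) ys rfl (r - y)

theorem drainLoop_Asim : ∀ (kept : List Int) (r : Int) (rest : List Int),
    Asim (kept ++ rest) r = Asim ((drainLoop kept r).1 ++ rest) ((drainLoop kept r).2) := by
  intro kept
  induction hk : kept.length using Nat.strong_induction_on generalizing kept with
  | _ n ih =>
    intro r rest
    rw [drainLoop]
    cases hp : popFit kept r with
    | none => simp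
    | some p =>
      cases p with
      | mk y ys =>
        have hl := popFit_length hp
        rw [Asim_some (popFit_append_left hp)]
        exact ih ys.length (by omega) ys rfl (r - y) rest

theorem bstream_Asim : ∀ (rest kept : List Int) (r : Int), (∀ y ∈ kept, ¬ y ≤ r) →
    Asim (kept ++ rest) r = (if bstream rest kept r = [] then none else some (bstream rest kept r)) := by
  intro rest
  induction rest with
  | nil =>
    intro kept r hk
    rw [List.append_nil, Asim_none (popFit_eq_none_iff.mpr hk)]
    simp [bstream]
  | cons x rest' ih =>
    intro kept r hk
    by_cases hx : x ≤ r
    · have hp : popFit (kept ++ x :: rest') r = some (x, kept ++ rest') := by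
        rw [popFit_append_nofit hk]; simp [popFit, if_pos hx]
      rw [Asim_some hp]
      rw [drainLoop_Asim kept (r - x) rest']
      rw [ih _ _ (drainLoop_nofit kept (r - x))]
      simp [bstream, if_pos hx]
    · have : kept ++ x :: rest' = (kept ++ [x]) ++ rest' := by simp
      rw [this, ih (kept ++ [x]) r (by intro y hy; rcases List.mem_append.mp hy with h | h
                                       · exact hk y h
                                       · simp at h; subst h; exact hx)]
      simp [bstream, if_neg hx]

-- ===== VERDICT (by name: the statement is the Claim_ definition above) =====
theorem return_wo_Tmax_spec : Claim_equal_return_wo_Tmax := by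
  intro lis Tmax _
  unfold Spec_return_wo_Tmax return_wo_Tmax return_wo_Tmax_alt
  rw [outerLoop_eq_Asim lis lis Tmax rfl]
  have := bstream_Asim lis [] Tmax (by simp)
  simpa using this
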